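-- pv_equiv track=rewrite | github.com/generalpublic/my-health-tracker | analysis_regression.py | build_model_data
-- ===== SOURCE A (Python) =====
-- def build_model_data(series, date_range, outcome_name, predictor_names, lag=0):
--     """Extract aligned predictor matrix and outcome vector.
--
--     lag > 0 means predictors from day D predict outcome on day D+lag.
--     """
--     X = []
--     y = []
--
--     out_series = series.get(outcome_name, {})
--     pred_series_list = [series.get(p, {}) for p in predictor_names]
--
--     for i, d in enumerate(date_range):
--         if i + lag >= len(date_range):
--             break
--
--         outcome_date = date_range[i + lag]
--         outcome_val = out_series.get(outcome_date)
--
--         pred_row = []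
--         for ps in pred_series_list:
--             pred_row.append(ps.get(d))
--
--         X.append(pred_row)
--         y.append(outcome_val)
--
--     return X, y
-- ===== SOURCE B (Python) =====
-- def build_model_data(series, date_range, outcome_name, predictor_names, lag=0):
--     """Extract aligned predictor matrix and outcome vector (column-wise build + transpose)."""
--     n = len(date_range)
--     valid = [i for i in range(n) if i + lag < n]
--
--     out_series = series.get(outcome_name, {})
--     y = [out_series.get(date_range[i + lag]) for i in valid]
--
--     if not predictor_names:
--         X = [[] for _ in valid]
--     else:
--         columns = []
--         for p in predictor_names:
--             ps = series.get(p, {})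
--             columns.append([ps.get(date_range[i]) for i in valid])
--         X = [list(row) for row in zip(*columns)]
--     return X, y
-- ===== Notes on version B (the rewrite author's own statement) =====
-- stated objective: alternative
-- what changed: B replaces A's single row-by-row loop with a break by a precomputed valid-index list, a column-wise build of each predictor series, and a final zip-transpose into rows.
import Mathlib
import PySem

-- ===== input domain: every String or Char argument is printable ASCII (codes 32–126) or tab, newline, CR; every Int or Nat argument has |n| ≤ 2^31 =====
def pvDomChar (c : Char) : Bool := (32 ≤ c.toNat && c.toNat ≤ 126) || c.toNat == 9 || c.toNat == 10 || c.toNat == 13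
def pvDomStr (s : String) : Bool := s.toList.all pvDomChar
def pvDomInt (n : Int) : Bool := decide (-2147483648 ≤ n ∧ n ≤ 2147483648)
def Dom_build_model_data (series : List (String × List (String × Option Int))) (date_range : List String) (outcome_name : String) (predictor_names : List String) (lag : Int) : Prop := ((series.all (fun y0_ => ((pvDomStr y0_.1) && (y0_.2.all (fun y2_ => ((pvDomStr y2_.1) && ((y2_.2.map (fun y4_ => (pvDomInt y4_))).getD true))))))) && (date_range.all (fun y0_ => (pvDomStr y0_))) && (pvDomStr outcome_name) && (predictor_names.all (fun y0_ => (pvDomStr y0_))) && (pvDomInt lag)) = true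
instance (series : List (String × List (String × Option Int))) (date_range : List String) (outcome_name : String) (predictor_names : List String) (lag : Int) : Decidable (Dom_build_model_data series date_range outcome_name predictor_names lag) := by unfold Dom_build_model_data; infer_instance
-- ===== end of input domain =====

-- B builds the matrix column-by-column and transposes (zip) instead of A's row-by-row loop with a break; objective: alternative decomposition, same cost. Return value only; no mutation in either version.

-- ===== PORT A =====
-- the for-loop with its break: i is the enumerate counter, the list argument the remaining dates
def bmdLoopA (out_series : List (String × Option Int)) (preds : List (List (String × Option Int))) (date_range : List String) (lag : Int) : Int → List String → List (List (Option Int)) × List (Option Int)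
  | _, [] => ([], [])
  | i, d :: rest =>
    if i + lag ≥ (date_range.length : Int) then ([], [])
    else
      match PySem.List.pyGet? date_range (i + lag) with
      | none => ([], [])  -- IndexError: excluded by Pre_
      | some outcome_date =>
        let outcome_val := ((PySem.Dict.mk out_series).get? outcome_date).getD none
        let pred_row := preds.map (fun ps => ((PySem.Dict.mk ps).get? d).getD none)
        let r := bmdLoopA out_series preds date_range lag (i + 1) rest
        (pred_row :: r.1, outcome_val :: r.2)

def build_model_data (series : List (String × List (String × Option Int))) (date_range : List String) (outcome_name : String) (predictor_names : List String) (lag : Int) : List (List (Option Int)) × List (Option Int) :=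
  let out_series := ((PySem.Dict.mk series).get? outcome_name).getD []
  let pred_series_list := predictor_names.map (fun p => ((PySem.Dict.mk series).get? p).getD [])
  bmdLoopA out_series pred_series_list date_range lag 0 date_range

-- ===== PORT B =====
-- zip(*(c :: cs)): rows while every list still has a head (structural recursion on the first column)
def bmdZip (c : List (Option Int)) (cs : List (List (Option Int))) : List (List (Option Int)) :=
  match c with
  | [] => []
  | x :: c' =>
    match cs.mapM List.head? with
    | none => []
    | some heads => (x :: heads) :: bmdZip c' (cs.map List.tail)

def build_model_data_alt (series : List (String × List (String × Option Int))) (date_range : List String) (outcome_name : String) (predictor_names : List String) (lag : Int) : List (List (Option Int)) × List (Option Int) :=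
  let n : Int := date_range.length
  let valid := (PySem.List.pyRange 0 n 1).filter (fun i => i + lag < n)
  let out_series := ((PySem.Dict.mk series).get? outcome_name).getD []
  let y := valid.map (fun i =>
    match PySem.List.pyGet? date_range (i + lag) with
    | none => none  -- IndexError: excluded by Pre_
    | some od => ((PySem.Dict.mk out_series).get? od).getD none)
  let X :=
    if predictor_names.isEmpty then valid.map (fun _ => ([] : List (Option Int)))
    else
      let columns := predictor_names.map (fun p =>
        let ps := ((PySem.Dict.mk series).get? p).getD []
        valid.map (fun i =>
          match PySem.List.pyGet? date_range i with
          | none => none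
          | some dd => ((PySem.Dict.mk ps).get? dd).getD none))
      match columns with
      | [] => []
      | c :: cs => bmdZip c cs
  (X, y)

-- ===== PRECONDITION & SPEC =====
-- Pre_ excludes exactly the inputs where Python A raises IndexError: a nonempty date_range with lag < -len(date_range)
-- (date_range[i+lag] is then out of range already at i = 0); B raises there too.
def Pre_build_model_data (series : List (String × List (String × Option Int))) (date_range : List String) (outcome_name : String) (predictor_names : List String) (lag : Int) : Prop :=
  date_range = [] ∨ -(date_range.length : Int) ≤ lag
instance (series : List (String × List (String × Option Int))) (date_range : List String) (outcome_name : String) (predictor_names : List String) (lag : Int) : Decidable (Pre_build_model_data series date_range outcome_name predictor_names lag) := by unfold Pre_build_model_data; infer_instance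

def pvWitness_build_model_data : (List (String × List (String × Option Int))) × List String × String × List String × Int :=
  ([("o", [("d1", some 5), ("d2", none)]), ("p", [("d1", some 1)])], ["d1", "d2"], "o", ["p"], 1)

def Spec_build_model_data (series : List (String × List (String × Option Int))) (date_range : List String) (outcome_name : String) (predictor_names : List String) (lag : Int) (out : List (List (Option Int)) × List (Option Int)) : Prop := out = build_model_data_alt series date_range outcome_name predictor_names lag
instance (series : List (String × List (String × Option Int))) (date_range : List String) (outcome_name : String) (predictor_names : List String) (lag : Int) (out : List (List (Option Int)) × List (Option Int)) : Decidable (Spec_build_model_data series date_range outcome_name predictor_names lag out) := by unfold Spec_build_model_data; infer_instance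

-- ===== CLAIM (what is proved, stated in full; the proofs are below) =====
def Claim_equal_build_model_data : Prop := ∀ (series : List (String × List (String × Option Int))) (date_range : List String) (outcome_name : String) (predictor_names : List String) (lag : Int), Dom_build_model_data series date_range outcome_name predictor_names lag → Pre_build_model_data series date_range outcome_name predictor_names lag → Spec_build_model_data series date_range outcome_name predictor_names lag (build_model_data series date_range outcome_name predictor_names lag)

-- ===== LEMMAS AND PROOFS =====

lemma bmdZip_map {P : Type} (f : Int → Option Int) (g : P → Int → Option Int) :
    ∀ (v : List Int) (ps : List P),
      bmdZip (v.map f) (ps.map (fun p => v.map (g p))) =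
        v.map (fun i => f i :: ps.map (fun p => g p i)) := by
  intro v
  induction v with
  | nil => intro ps; simp [bmdZip]
  | cons i v' ih =>
    intro ps
    have hheads : (ps.map (fun p => (g p i :: v'.map (g p) : List (Option Int)))).mapM List.head?
        = some (ps.map (fun p => g p i)) := by
      induction ps with
      | nil => simp
      | cons p ps' ihp => simp_all
    have htails : (ps.map (fun p => (g p i :: v'.map (g p) : List (Option Int)))).map List.tail
        = ps.map (fun p => v'.map (g p)) := by
      simp [List.map_map]
    simp only [List.map_cons, bmdZip, hheads, htails, ih]

lemma bmdLoopA_eq (out_series : List (String × Option Int)) (preds : List (List (String × Option Int)))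
    (date_range : List String) (lag : Int)
    (hlag : -(date_range.length : Int) ≤ lag) :
    ∀ (l : List String) (i : Nat), date_range.drop i = l →
      bmdLoopA out_series preds date_range lag (i : Int) l =
        ( ((PySem.List.pyRange (i : Int) (date_range.length : Int) 1).filter
            (fun j => j + lag < (date_range.length : Int))).map
            (fun j => preds.map (fun ps =>
              match PySem.List.pyGet? date_range j with
              | none => none
              | some dd => ((PySem.Dict.mk ps).get? dd).getD none)),
          ((PySem.List.pyRange (i : Int) (date_range.length : Int) 1).filter
            (fun j => j + lag < (date_range.length : Int))).map
            (fun j =>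
              match PySem.List.pyGet? date_range (j + lag) with
              | none => none
              | some od => ((PySem.Dict.mk out_series).get? od).getD none) ) := by
  intro l
  induction l with
  | nil =>
    intro i hdrop
    have hn : date_range.length ≤ i := by
      have := congrArg List.length hdrop
      simp [List.length_drop] at this
      omega
    have : PySem.List.pyRange (i : Int) (date_range.length : Int) 1 = [] :=
      PySem.List.pyRange_one_eq_nil (by exact_mod_cast hn)
    simp [bmdLoopA, this]
  | cons d rest ih =>
    intro i hdrop
    have hi : i < date_range.length := by
      by_contra h
      have : date_range.drop i = [] := List.drop_eq_nil_of_le (by omega)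
      rw [this] at hdrop; simp at hdrop
    have hrange : PySem.List.pyRange (i : Int) (date_range.length : Int) 1
        = (i : Int) :: PySem.List.pyRange ((i : Int) + 1) (date_range.length : Int) 1 :=
      PySem.List.pyRange_one_cons (by exact_mod_cast hi)
    have hrest : date_range.drop (i + 1) = rest := by
      have := congrArg List.tail hdrop
      simpa [List.tail_drop] using this
    by_cases hbreak : (i : Int) + lag ≥ (date_range.length : Int)
    · -- break: every later index also fails the filter
      have hfilt : ((PySem.List.pyRange (i : Int) (date_range.length : Int) 1).filter
          (fun j => j + lag < (date_range.length : Int))) = [] := by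
        apply List.filter_eq_nil_iff.mpr
        intro j hj
        have := (PySem.List.mem_pyRange_one).mp hj
        simp only [decide_eq_true_eq]
        omega
      simp [bmdLoopA, hbreak, hfilt]
    · rw [not_le] at hbreak
      have hinr : PySem.Raise.InRange date_range.length ((i : Int) + lag) := by
        constructor <;> omega
      obtain ⟨od, hod⟩ : ∃ od, PySem.List.pyGet? date_range ((i : Int) + lag) = some od := by
        rcases h : PySem.List.pyGet? date_range ((i : Int) + lag) with _ | od
        · exact absurd ((PySem.List.pyGet?_eq_none_iff _ _).mp h) (by simpa using hinr)
        · exact ⟨od, rfl⟩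
      have hd : PySem.List.pyGet? date_range (i : Int) = some d := by
        rw [PySem.List.pyGet?_natCast]
        have : date_range[i]? = some d := by
          have := congrArg List.head? hdrop
          simpa [List.head?_drop] using this
        exact this
      have hfilt : ((PySem.List.pyRange (i : Int) (date_range.length : Int) 1).filter
          (fun j => j + lag < (date_range.length : Int)))
          = (i : Int) :: ((PySem.List.pyRange ((i : Int) + 1) (date_range.length : Int) 1).filter
            (fun j => j + lag < (date_range.length : Int))) := by
        rw [hrange, List.filter_cons]
        simp [hbreak]
      have ihr := ih (i + 1) hrest
      simp only [bmdLoopA]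
      rw [if_neg (not_le.mpr hbreak)]
      rw [hfilt]
      simp only [List.map_cons, hod, hd]
      have : ((i : Nat) : Int) + 1 = (((i + 1 : Nat)) : Int) := by push_cast; ring
      rw [this, ihr]

lemma bmd_main (series : List (String × List (String × Option Int))) (date_range : List String)
    (outcome_name : String) (predictor_names : List String) (lag : Int)
    (hpre : Pre_build_model_data series date_range outcome_name predictor_names lag) :
    build_model_data series date_range outcome_name predictor_names lag
      = build_model_data_alt series date_range outcome_name predictor_names lag := by
  have hlag : -(date_range.length : Int) ≤ lag ∨ date_range = [] := by
    rcases hpre with h | h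
    · exact Or.inr h
    · exact Or.inl h
  rcases hlag with hlag | hnil
  case inr =>
    subst hnil
    cases predictor_names <;>
      simp [build_model_data, build_model_data_alt, bmdLoopA, bmdZip,
        PySem.List.pyRange_one_eq_nil]
  case inl =>
  have h0 := bmdLoopA_eq (((PySem.Dict.mk series).get? outcome_name).getD [])
    (predictor_names.map (fun p => ((PySem.Dict.mk series).get? p).getD []))
    date_range lag hlag date_range 0 (by simp)
  push_cast at h0
  simp only [build_model_data, build_model_data_alt]
  rw [h0]
  set valid := ((PySem.List.pyRange 0 (date_range.length : Int) 1).filter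
      (fun j => j + lag < (date_range.length : Int))) with hv
  cases hp : predictor_names with
  | nil => simp
  | cons p0 prest =>
    simp only [List.isEmpty_cons, List.map_cons, Bool.false_eq_true, if_false]
    rw [bmdZip_map
      (fun i => match PySem.List.pyGet? date_range i with
        | none => none
        | some dd => ((PySem.Dict.mk (((PySem.Dict.mk series).get? p0).getD [])).get? dd).getD none)
      (fun p i => match PySem.List.pyGet? date_range i with
        | none => none
        | some dd => ((PySem.Dict.mk (((PySem.Dict.mk series).get? p).getD [])).get? dd).getD none)
      valid prest]
    simp [List.map_map, Function.comp]

-- ===== VERDICT (by name: the statement is the Claim_ definition above) =====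
theorem build_model_data_spec : Claim_equal_build_model_data := by
  intro series date_range outcome_name predictor_names lag _ hpre
  unfold Spec_build_model_data
  exact bmd_main series date_range outcome_name predictor_names lag hpre
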